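-- pv_equiv track=rewrite | github.com/TMInstaller/Python-Coding-Test | 프로그래머스 1단계/예산.py | solution
-- ===== SOURCE A (Python) =====
-- def solution(d, budget):
--     answer = 0
--     # d를 오름차순으로 정렬
--     d.sort()
--     # 지원해 주고 남은 예산과 지원해 준 팀을 반복해서 확인하기
--     for i in range(len(d)):
--         if d[i] > budget:
--             break
--         budget -= d[i]
--         answer += 1
--     return answer
-- ===== SOURCE B (Python) =====
-- def solution(d, budget):
--     # Selection-based greedy: no sorting; repeatedly extract the cheapest
--     # remaining request while it still fits the budget.
--     # (Return-value equivalent to A; unlike A it does not sort d in place.)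
--     pool = list(d)
--     answer = 0
--     while pool:
--         m = min(pool)
--         if m > budget:
--             break
--         budget -= m
--         pool.remove(m)
--         answer += 1
--     return answer
-- ===== Notes on version B (the rewrite author's own statement) =====
-- stated objective: alternative
-- what changed: B drops the sort entirely and runs a selection-based greedy: it repeatedly extracts min(pool) from a working copy and funds it while it fits, instead of A's sort-then-linear-scan with a break; B also leaves d unmutated (A sorts it in place).
import Mathlib
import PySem

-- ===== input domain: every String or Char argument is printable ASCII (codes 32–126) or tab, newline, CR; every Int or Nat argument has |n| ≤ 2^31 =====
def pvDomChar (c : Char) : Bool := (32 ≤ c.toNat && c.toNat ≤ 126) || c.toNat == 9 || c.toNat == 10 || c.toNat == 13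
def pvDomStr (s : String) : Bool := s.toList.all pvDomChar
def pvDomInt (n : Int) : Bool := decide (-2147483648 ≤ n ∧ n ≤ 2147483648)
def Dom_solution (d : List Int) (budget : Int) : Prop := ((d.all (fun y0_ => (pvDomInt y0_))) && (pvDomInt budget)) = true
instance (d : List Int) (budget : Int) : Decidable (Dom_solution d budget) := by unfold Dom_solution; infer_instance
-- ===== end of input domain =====

-- B replaces A's sort-then-scan greedy by a selection-based greedy (repeated min extraction, no sort);
-- return-value equivalence only: A sorts d in place, B leaves d unmodified.

-- ===== PORT A =====
-- the for-loop with break: state (budget, answer), stop at first d[i] > budget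
def solutionGo (xs : List Int) (budget : Int) (answer : Int) : Int :=
  match xs with
  | [] => answer
  | x :: rest => if x > budget then answer else solutionGo rest (budget - x) (answer + 1)

def solution (d : List Int) (budget : Int) : Int :=
  solutionGo (PySem.List.sorted d (fun x => x) false) budget 0

-- termination helper for the extraction loop (cited by decreasing_by)
lemma pvEraseLenLt {m : Int} {xs : List Int} (h : m ∈ xs) : (xs.erase m).length < xs.length := by
  rw [List.length_erase_of_mem h]; exact Nat.sub_lt (List.length_pos_of_mem h) Nat.one_pos

-- ===== PORT B =====
-- while pool: m = min(pool); if m > budget: break; budget -= m; pool.remove(m); answer += 1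
def solutionAltGo (pool : List Int) (budget : Int) (answer : Int) : Int :=
  match hm : PySem.List.min? pool (fun x => x) with
  | none => answer                 -- pool empty: while loop ends
  | some m =>
    if m > budget then answer
    else
      match hr : PySem.List.remove? pool m with
      | none => answer             -- unreachable: min is a member
      | some rest => solutionAltGo rest (budget - m) (answer + 1)
termination_by pool.length
decreasing_by
  have hmem : m ∈ pool := PySem.List.min?_mem hm
  rw [PySem.List.remove?_eq_some_erase _ m hmem] at hr
  cases hr
  exact pvEraseLenLt hmem

def solution_alt (d : List Int) (budget : Int) : Int :=
  solutionAltGo d budget 0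

-- ===== PRECONDITION & SPEC =====
def Spec_solution (d : List Int) (budget : Int) (out : Int) : Prop := out = solution_alt d budget
instance (d : List Int) (budget : Int) (out : Int) : Decidable (Spec_solution d budget out) := by unfold Spec_solution; infer_instance

-- ===== CLAIM (what is proved, stated in full; the proofs are below) =====
def Claim_equal_solution : Prop := ∀ (d : List Int) (budget : Int), Dom_solution d budget → Spec_solution d budget (solution d budget)

-- ===== LEMMAS AND PROOFS =====

-- repeated min-extraction consumes exactly the sorted order
lemma solutionAltGo_eq_solutionGo_sorted (pool : List Int) (b a : Int) :
    solutionAltGo pool b a = solutionGo (PySem.List.sorted pool (fun x => x) false) b a := by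
  induction hn : pool.length using Nat.strong_induction_on generalizing pool b a with
  | _ n ih =>
  cases hpool : pool with
  | nil => rw [solutionAltGo.eq_def]; simp [solutionGo, PySem.List.sorted, PySem.List.min?]
  | cons x xs =>
    subst hpool
    obtain ⟨m0, t, hsort⟩ : ∃ m0 t, PySem.List.sorted (x :: xs) (fun y => y) false = m0 :: t := by
      cases hs : PySem.List.sorted (x :: xs) (fun y => y) false with
      | nil => exact absurd ((PySem.List.sorted_eq_nil_iff _ _ _).mp hs) (by simp)
      | cons p q => exact ⟨p, q, rfl⟩
    rw [solutionAltGo.eq_def]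
    split
    · next hm => exact absurd ((PySem.List.min?_eq_none_iff _ _).mp hm) (by simp)
    · next m hm =>
      have hmem : m ∈ (x :: xs) := PySem.List.min?_mem hm
      have hmin : ∀ y ∈ (x :: xs), m ≤ y := PySem.List.min?_isMin hm
      have hm0mem : m0 ∈ (x :: xs) :=
        (PySem.List.mem_sorted (x :: xs) (fun y => y) false m0).mp
          (by rw [hsort]; exact List.mem_cons_self)
      have hhead : ∀ y ∈ (x :: xs), m0 ≤ y :=
        PySem.List.key_head_sorted_le (x :: xs) (fun y => y) hsort
      have hmm0 : m = m0 := le_antisymm (hmin m0 hm0mem) (hhead m hmem)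
      have herase : PySem.List.sorted ((x :: xs).erase m0) (fun y => y) false = t := by
        refine PySem.List.sorted_id_eq_of_perm_of_pairwise _ _ ?_ ?_
        · have := (PySem.List.sorted_perm (x :: xs) (fun y : Int => y) false).erase m0
          rw [hsort] at this
          simpa using this
        · have := PySem.List.sorted_pairwise (x :: xs) (fun y : Int => y)
          rw [hsort] at this
          exact this.of_cons
      rw [hsort, solutionGo]
      by_cases hgt : m0 > b
      · rw [if_pos (hmm0 ▸ hgt), if_pos hgt]
      · rw [if_neg (hmm0 ▸ hgt), if_neg hgt]
        split
        · next hr =>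
          rw [PySem.List.remove?_eq_some_erase _ m hmem] at hr
          exact absurd hr (by simp)
        · next rest hr =>
          rw [PySem.List.remove?_eq_some_erase _ m hmem] at hr
          cases hr
          subst hmm0
          rw [← herase]
          exact ih _ (hn ▸ pvEraseLenLt hmem) _ _ _ rfl

-- ===== VERDICT (by name: the statement is the Claim_ definition above) =====
theorem solution_spec : Claim_equal_solution := by
  intro d budget _
  unfold Spec_solution solution solution_alt
  exact (solutionAltGo_eq_solutionGo_sorted d budget 0).symm
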